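-- pv_equiv track=rewrite | github.com/crash-and-compile/dc32-problems | checkdiff-easy/generator.py | calculate_checkdifference
-- ===== SOURCE A (Python) =====
-- def calculate_checkdifference(data):
--     checkdifference = 255
--     for index, byte in enumerate(data):
--         if index % 2 == 0:
--             checkdifference -= byte
--         else:
--             checkdifference += byte
--     return checkdifference
-- ===== SOURCE B (Python) =====
-- def calculate_checkdifference(data):
--     # consume the data two elements at a time: no per-element parity test
--     evens = 0
--     odds = 0
--     i = 0
--     n = len(data)
--     while i + 1 < n:
--         evens += data[i]
--         odds += data[i + 1]
--         i += 2
--     if i < n: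
--         evens += data[i]
--     return 255 - evens + odds
-- ===== Notes on version B (the rewrite author's own statement) =====
-- stated objective: alternative
-- what changed: Replaces the single enumerate loop with a per-index parity branch by a recursive every-other-element summation helper applied twice (to the list and to its tail), combining 255 - sum(evens) + sum(odds) with no per-element conditional.
import Mathlib
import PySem

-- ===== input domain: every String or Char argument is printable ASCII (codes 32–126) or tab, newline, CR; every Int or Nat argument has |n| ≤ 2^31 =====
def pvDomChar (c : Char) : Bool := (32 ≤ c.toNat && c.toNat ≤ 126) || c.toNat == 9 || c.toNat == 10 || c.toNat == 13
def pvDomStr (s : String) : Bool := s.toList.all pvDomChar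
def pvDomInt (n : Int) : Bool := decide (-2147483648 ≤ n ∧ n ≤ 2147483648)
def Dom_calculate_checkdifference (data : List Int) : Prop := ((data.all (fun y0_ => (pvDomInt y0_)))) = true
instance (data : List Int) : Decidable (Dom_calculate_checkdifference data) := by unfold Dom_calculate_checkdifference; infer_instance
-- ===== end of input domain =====

-- B replaces A's enumerate loop with per-index parity test by a two-at-a-time loop
-- accumulating the even-position and odd-position sums separately (alternative decomposition).

-- ===== PORT A =====
def calculate_checkdifference (data : List Int) : Int :=
  (PySem.List.enumerate data 0).foldl
    (fun checkdifference p =>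
      if PySem.Int.mod p.1 2 = 0 then checkdifference - p.2 else checkdifference + p.2)
    255

-- ===== PORT B =====
-- the while loop of Source B: state (evens, odds), consuming two elements per step
def pvAltLoop : List Int → Int → Int → Int × Int
  | x :: y :: rest, evens, odds => pvAltLoop rest (evens + x) (odds + y)
  | [x], evens, odds => (evens + x, odds)
  | [], evens, odds => (evens, odds)

def calculate_checkdifference_alt (data : List Int) : Int :=
  let p := pvAltLoop data 0 0
  255 - p.1 + p.2

-- ===== PRECONDITION & SPEC =====
def Spec_calculate_checkdifference (data : List Int) (out : Int) : Prop := out = calculate_checkdifference_alt data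
instance (data : List Int) (out : Int) : Decidable (Spec_calculate_checkdifference data out) := by unfold Spec_calculate_checkdifference; infer_instance

-- ===== CLAIM (what is proved, stated in full; the proofs are below) =====
def Claim_equal_calculate_checkdifference : Prop := ∀ (data : List Int), Dom_calculate_checkdifference data → Spec_calculate_checkdifference data (calculate_checkdifference data)

-- ===== LEMMAS AND PROOFS =====

-- two-elements-at-a-time induction on lists (matches pvAltLoop's recursion shape)
theorem pv_twoStep {P : List Int → Prop} (h0 : P []) (h1 : ∀ x, P [x])
    (h2 : ∀ x y r, P r → P (x :: y :: r)) : ∀ l, P l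
  | [] => h0
  | [x] => h1 x
  | x :: y :: r => h2 x y r (pv_twoStep h0 h1 h2 r)

-- pvAltLoop's accumulators split off additively
theorem pv_altLoop_split (l : List Int) : ∀ (e o : Int),
    pvAltLoop l e o = (e + (pvAltLoop l 0 0).1, o + (pvAltLoop l 0 0).2) := by
  induction l using pv_twoStep with
  | h0 => intro e o; simp [pvAltLoop]
  | h1 x => intro e o; simp [pvAltLoop]
  | h2 x y r ih =>
      intro e o
      simp only [pvAltLoop]
      rw [ih (e + x) (o + y), ih (0 + x) (0 + y)]
      rw [Prod.mk.injEq]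
      constructor <;> ring

-- A's fold over enumerate, started at an even index 2k with accumulator c,
-- equals c - evens + odds where (evens, odds) = pvAltLoop of the remaining list.
theorem pv_fold_eq_altLoop (data : List Int) : ∀ (k : Nat) (c : Int),
    (PySem.List.enumerate data (2 * (k : Int))).foldl
      (fun checkdifference p =>
        if PySem.Int.mod p.1 2 = 0 then checkdifference - p.2 else checkdifference + p.2)
      c
    = c - (pvAltLoop data 0 0).1 + (pvAltLoop data 0 0).2 := by
  induction data using pv_twoStep with
  | h0 => intro k c; simp [PySem.List.enumerate_nil, pvAltLoop]
  | h1 x =>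
      intro k c
      simp [PySem.List.enumerate_cons, PySem.List.enumerate_nil, PySem.Int.mod, pvAltLoop]
  | h2 x y rest ih =>
      intro k c
      have h0 : PySem.Int.mod (2 * (k : Int)) 2 = 0 := by
        simp [PySem.Int.mod]
      have h1 : PySem.Int.mod (2 * (k : Int) + 1) 2 = 1 := by
        simp [PySem.Int.mod]
      have h2 : (2 * (k : Int)) + 1 + 1 = 2 * ((k + 1 : Nat) : Int) := by push_cast; ring
      rw [PySem.List.enumerate_cons, PySem.List.enumerate_cons, List.foldl_cons,
        List.foldl_cons, h2]
      simp only [h0, h1, reduceIte, if_neg (one_ne_zero (α := Int))]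
      rw [ih (k + 1) (c - x + y)]
      rw [show pvAltLoop (x :: y :: rest) 0 0 = pvAltLoop rest (0 + x) (0 + y) from rfl,
        pv_altLoop_split rest (0 + x) (0 + y)]
      ring

-- ===== VERDICT (by name: the statement is the Claim_ definition above) =====
theorem calculate_checkdifference_spec : Claim_equal_calculate_checkdifference := by
  intro data _
  unfold Spec_calculate_checkdifference calculate_checkdifference calculate_checkdifference_alt
  have h := pv_fold_eq_altLoop data 0 255
  simpa using h
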